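-- pv_equiv track=rewrite | github.com/limanjohnson/RLG-Discovery_App_Render-API-and-Worpress-Integration | logic.py | _best_token_for_prefix
-- ===== SOURCE A (Python) =====
-- from typing import Dict, Optional, Tuple, List, Iterable, Set
--
-- def _is_zero_padded(num: str) -> bool:
--     return len(num) >= 6 and num[0] == "0"
--
-- def _best_token_for_prefix(cands: List[Tuple[str,str]], want_prefix: str) -> Optional[str]:
--     for pfx, num in cands:
--         if pfx == want_prefix and _is_zero_padded(num):
--             return f"{pfx} {num}"
--     for pfx, num in cands:
--         if pfx == want_prefix:
--             return f"{pfx} {num}"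
--     return None
-- ===== SOURCE B (Python) =====
-- def _is_zero_padded(num: str) -> bool:
--     return len(num) >= 6 and num[0] == "0"
--
-- def _best_token_for_prefix(cands, want_prefix):
--     best_plain = None
--     for pfx, num in cands:
--         if pfx == want_prefix:
--             if _is_zero_padded(num):
--                 return f"{pfx} {num}"
--             if best_plain is None:
--                 best_plain = f"{pfx} {num}"
--     return best_plain
-- ===== Notes on version B (the rewrite author's own statement) =====
-- stated objective: simpler
-- what changed: Replaces A's two full passes over cands with a single pass that returns immediately on the first zero-padded match and remembers the first plain match as a fallback.
import Mathlib
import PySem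

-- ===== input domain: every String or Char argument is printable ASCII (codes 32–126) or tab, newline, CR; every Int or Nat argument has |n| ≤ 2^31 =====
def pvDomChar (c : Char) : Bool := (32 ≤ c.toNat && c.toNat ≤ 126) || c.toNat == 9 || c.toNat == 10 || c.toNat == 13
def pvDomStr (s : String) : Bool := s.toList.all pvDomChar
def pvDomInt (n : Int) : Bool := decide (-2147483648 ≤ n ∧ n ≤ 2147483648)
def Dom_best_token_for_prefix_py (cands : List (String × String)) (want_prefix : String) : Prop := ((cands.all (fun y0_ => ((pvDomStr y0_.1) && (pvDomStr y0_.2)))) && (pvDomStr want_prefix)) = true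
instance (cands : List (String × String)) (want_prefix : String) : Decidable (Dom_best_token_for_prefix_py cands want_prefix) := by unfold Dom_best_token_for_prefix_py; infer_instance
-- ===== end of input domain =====

-- B replaces A's two passes over cands with one pass that returns the first zero-padded
-- match immediately and remembers the first plain match as a fallback (objective: simpler).

-- ===== PORT A =====
-- len(num) >= 6 and num[0] == "0": short-circuit means num[0] only evaluated when length ≥ 6,
-- so head? = some '0' is exact there.
def pvIsZeroPadded (num : String) : Bool :=
  decide (6 ≤ num.toList.length) && (num.toList.head? == some '0')

def pvFmt (pfx num : String) : String := String.mk (pfx.toList ++ [' '] ++ num.toList)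

def pvFindPadded (w : String) : List (String × String) → Option String
  | [] => none
  | (pfx, num) :: rest =>
    if pfx = w && pvIsZeroPadded num then some (pvFmt pfx num) else pvFindPadded w rest

def pvFindPlain (w : String) : List (String × String) → Option String
  | [] => none
  | (pfx, num) :: rest =>
    if pfx = w then some (pvFmt pfx num) else pvFindPlain w rest

def best_token_for_prefix_py (cands : List (String × String)) (want_prefix : String) : Option String :=
  match pvFindPadded want_prefix cands with
  | some s => some s
  | none => pvFindPlain want_prefix cands

-- ===== PORT B =====
def pvLoopB (w : String) : List (String × String) → Option String → Option String
  | [], best => best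
  | (pfx, num) :: rest, best =>
    if pfx = w then
      if pvIsZeroPadded num then some (pvFmt pfx num)
      else pvLoopB w rest (if best.isNone then some (pvFmt pfx num) else best)
    else pvLoopB w rest best

def best_token_for_prefix_py_alt (cands : List (String × String)) (want_prefix : String) : Option String :=
  pvLoopB want_prefix cands none

-- ===== PRECONDITION & SPEC =====
def Spec_best_token_for_prefix_py (cands : List (String × String)) (want_prefix : String) (out : Option String) : Prop := out = best_token_for_prefix_py_alt cands want_prefix
instance (cands : List (String × String)) (want_prefix : String) (out : Option String) : Decidable (Spec_best_token_for_prefix_py cands want_prefix out) := by unfold Spec_best_token_for_prefix_py; infer_instance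

-- ===== CLAIM (what is proved, stated in full; the proofs are below) =====
def Claim_equal_best_token_for_prefix_py : Prop := ∀ (cands : List (String × String)) (want_prefix : String), Dom_best_token_for_prefix_py cands want_prefix → Spec_best_token_for_prefix_py cands want_prefix (best_token_for_prefix_py cands want_prefix)

-- ===== LEMMAS AND PROOFS =====
-- Loop invariant: B's loop with accumulator `best` computes A's two-pass result with `best`
-- taking priority over any later plain match.
theorem pvLoopB_char (w : String) (l : List (String × String)) (best : Option String) :
    pvLoopB w l best =
      match pvFindPadded w l with
      | some s => some s
      | none => match best with
        | some b => some b
        | none => pvFindPlain w l := by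
  induction l generalizing best with
  | nil => cases best <;> simp [pvLoopB, pvFindPadded, pvFindPlain]
  | cons hd tl ih =>
    obtain ⟨pfx, num⟩ := hd
    by_cases hp : pfx = w
    · by_cases hz : pvIsZeroPadded num = true
      · simp [pvLoopB, pvFindPadded, hp, hz]
      · cases best <;>
          simp [pvLoopB, pvFindPadded, pvFindPlain, hp, hz, ih]
    · cases best <;> simp [pvLoopB, pvFindPadded, pvFindPlain, hp, ih]

-- ===== VERDICT (by name: the statement is the Claim_ definition above) =====
theorem best_token_for_prefix_py_spec : Claim_equal_best_token_for_prefix_py := by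
  intro cands w _
  unfold Spec_best_token_for_prefix_py best_token_for_prefix_py best_token_for_prefix_py_alt
  rw [pvLoopB_char]
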